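-- pv_equiv track=rewrite | github.com/KeyBoyMad/podcast-pipeline | podcast_pipeline/cleaner.py | _deduplicate_overlap
-- ===== SOURCE A (Python) =====
-- OVERLAP_CHARS = 200      # 相邻块重叠字数
--
-- def _deduplicate_overlap(prev: str, curr: str) -> str:
--     """
--     在 prev 末尾 / curr 开头找重叠区，取 curr 版本拼接。
--     """
--     search_window = min(OVERLAP_CHARS * 2, len(prev), len(curr))
--     tail = prev[-search_window:]
--     head = curr[:search_window]
--
--     best_pos = 0
--     for length in range(min(len(tail), len(head)), 20, -1):
--         sub = head[:length]
--         if sub in tail: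
--             idx = curr.find(sub)
--             if idx >= 0:
--                 best_pos = idx + length
--                 break
--
--     return prev + curr[best_pos:]
-- ===== SOURCE B (Python) =====
-- OVERLAP_CHARS = 200      # 相邻块重叠字数
--
-- def _common_prefix_len(a: str, b: str) -> int:
--     c = 0
--     while c < len(a) and c < len(b) and a[c] == b[c]:
--         c += 1
--     return c
--
-- def _deduplicate_overlap(prev: str, curr: str) -> str:
--     """
--     Scan every start position in prev's tail window and extend the match
--     against curr's head; splice at the longest overlap if it exceeds 20 chars.
--     """
--     w = min(OVERLAP_CHARS * 2, len(prev), len(curr))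
--     tail = prev[len(prev) - w:]
--     head = curr[:w]
--
--     best = 0
--     for i in range(len(tail)):
--         c = _common_prefix_len(tail[i:], head)
--         if c > best:
--             best = c
--
--     pos = best if best > 20 else 0
--     return prev + curr[pos:]
-- ===== Notes on version B (the rewrite author's own statement) =====
-- stated objective: alternative
-- what changed: Replaces the decreasing prefix-length 'sub in tail' membership probes (with find-based splice index) by a single scan over start positions in the tail that extends the common prefix with the head and keeps the maximum, then thresholds at 20.
import Mathlib
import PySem

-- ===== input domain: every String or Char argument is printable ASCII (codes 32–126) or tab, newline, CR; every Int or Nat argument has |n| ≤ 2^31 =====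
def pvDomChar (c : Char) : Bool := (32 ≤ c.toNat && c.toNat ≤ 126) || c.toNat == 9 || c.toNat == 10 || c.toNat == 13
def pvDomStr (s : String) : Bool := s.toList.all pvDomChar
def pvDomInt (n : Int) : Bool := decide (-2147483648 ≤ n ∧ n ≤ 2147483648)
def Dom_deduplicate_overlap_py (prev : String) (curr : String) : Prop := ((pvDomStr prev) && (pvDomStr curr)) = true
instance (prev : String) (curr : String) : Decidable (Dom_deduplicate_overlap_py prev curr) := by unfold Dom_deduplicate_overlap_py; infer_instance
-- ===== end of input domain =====

-- B replaces A's decreasing prefix-length membership probes by a single scan over tail start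
-- positions extending the common prefix with the head (objective: alternative algorithm).

-- ===== PORT A =====
-- the for-loop over decreasing candidate lengths, with its break
def pvALoop (C T H : List Char) : List Int → Int
  | [] => 0
  | L :: rest =>
      let sub := PySem.List.slice H none (some L)
      if PySem.Chars.isIn sub T then
        let idx := PySem.Chars.find C sub
        if 0 ≤ idx then idx + L else pvALoop C T H rest
      else pvALoop C T H rest

def deduplicate_overlap_py (prev : String) (curr : String) : String :=
  let P := prev.toList
  let C := curr.toList
  let W : Int := min (min 400 (P.length : Int)) (C.length : Int)
  let T := PySem.List.slice P (some (-W)) none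
  let H := PySem.List.slice C none (some W)
  let best := pvALoop C T H
      (PySem.List.pyRange (min (T.length : Int) (H.length : Int)) 20 (-1))
  String.ofList (P ++ PySem.List.slice C (some best) none)

-- ===== PORT B =====
-- _common_prefix_len: extend while the characters match
def pvCpl : List Char → List Char → Nat
  | a :: as, b :: bs => if a = b then pvCpl as bs + 1 else 0
  | _, _ => 0

def deduplicate_overlap_py_alt (prev : String) (curr : String) : String :=
  let P := prev.toList
  let C := curr.toList
  let w : Int := min (min 400 (P.length : Int)) (C.length : Int)
  let T := PySem.List.slice P (some ((P.length : Int) - w)) none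
  let H := PySem.List.slice C none (some w)
  let best := (PySem.List.pyRange 0 (T.length : Int) 1).foldl
      (fun b i =>
        let c : Int := pvCpl (PySem.List.slice T (some i) none) H
        if b < c then c else b) 0
  let pos := if 20 < best then best else 0
  String.ofList (P ++ PySem.List.slice C (some pos) none)

-- ===== PRECONDITION & SPEC =====
def Spec_deduplicate_overlap_py (prev : String) (curr : String) (out : String) : Prop := out = deduplicate_overlap_py_alt prev curr
instance (prev : String) (curr : String) (out : String) : Decidable (Spec_deduplicate_overlap_py prev curr out) := by unfold Spec_deduplicate_overlap_py; infer_instance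

-- ===== CLAIM (what is proved, stated in full; the proofs are below) =====
def Claim_equal_deduplicate_overlap_py : Prop := ∀ (prev : String) (curr : String), Dom_deduplicate_overlap_py prev curr → Spec_deduplicate_overlap_py prev curr (deduplicate_overlap_py prev curr)

-- ===== LEMMAS AND PROOFS =====

lemma pvCpl_le_right (x y : List Char) : pvCpl x y ≤ y.length := by
  fun_induction pvCpl x y <;> simp_all

lemma pvCpl_nil_left (y : List Char) : pvCpl [] y = 0 := by
  cases y <;> rfl

lemma take_prefix_iff_le_cpl (x y : List Char) (L : Nat) (hL : L ≤ y.length) :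
    y.take L <+: x ↔ L ≤ pvCpl x y := by
  induction L generalizing x y with
  | zero => simp
  | succ L ih =>
    cases y with
    | nil => simp at hL
    | cons b bs =>
      cases x with
      | nil => simp [pvCpl_nil_left]
      | cons a as =>
        by_cases hab : a = b
        · subst hab
          have h2 := ih as bs (by simpa using hL)
          simp [pvCpl, List.take_succ_cons, List.cons_prefix_cons, h2]
        · simp [pvCpl, List.take_succ_cons, List.cons_prefix_cons, hab, Ne.symm hab]

lemma foldl_max_le {α : Type} (f : α → Nat) (l : List α) (b m : Nat)
    (hb : b ≤ m) (h : ∀ a ∈ l, f a ≤ m) :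
    l.foldl (fun acc a => max acc (f a)) b ≤ m := by
  induction l generalizing b with
  | nil => simpa using hb
  | cons c l ih => exact ih _ (by simp_all) (fun a ha => h a (by simp [ha]))

lemma init_le_foldl_max {α : Type} (f : α → Nat) (l : List α) (b : Nat) :
    b ≤ l.foldl (fun acc a => max acc (f a)) b := by
  induction l generalizing b with
  | nil => simp
  | cons c l ih => exact le_trans (le_max_left _ _) (ih _)

lemma le_foldl_max' {α : Type} (f : α → Nat) (l : List α) (b : Nat) (a : α) (ha : a ∈ l) :
    f a ≤ l.foldl (fun acc a => max acc (f a)) b := by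
  induction l generalizing b with
  | nil => simp at ha
  | cons c l ih =>
    rcases List.mem_cons.1 ha with rfl | ha
    · exact le_trans (le_max_right b (f a)) (init_le_foldl_max f l _)
    · exact ih _ ha

lemma foldl_max_attained {α : Type} (f : α → Nat) (l : List α) (b : Nat) :
    l.foldl (fun acc a => max acc (f a)) b = b ∨
      ∃ a ∈ l, l.foldl (fun acc a => max acc (f a)) b = f a := by
  induction l generalizing b with
  | nil => left; rfl
  | cons c l ih =>
    rcases ih (max b (f c)) with h | ⟨a, ha, h⟩
    · rcases max_choice b (f c) with h2 | h2
      · left; simp only [List.foldl_cons]; rw [h, h2]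
      · right; exact ⟨c, by simp, by simp only [List.foldl_cons]; rw [h, h2]⟩
    · right; exact ⟨a, by simp [ha], h⟩

def pvMax (T H : List Char) : Nat :=
  (List.range T.length).foldl (fun b k => max b (pvCpl (T.drop k) H)) 0

lemma pvMax_le (T H : List Char) : pvMax T H ≤ H.length :=
  foldl_max_le _ _ _ _ (Nat.zero_le _) (fun k _ => pvCpl_le_right _ _)

lemma isIn_take_iff (T H : List Char) (L : Nat) (h1 : 1 ≤ L) (hL : L ≤ H.length) :
    PySem.Chars.isIn (H.take L) T = true ↔ L ≤ pvMax T H := by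
  rw [← PySem.Chars.exists_prefix_drop_iff_isIn]
  constructor
  · rintro ⟨j, hj⟩
    have hcp : L ≤ pvCpl (T.drop j) H := (take_prefix_iff_le_cpl _ _ L hL).1 hj
    by_cases hjT : j < T.length
    · rw [pvMax]
      exact le_trans hcp (le_foldl_max' (fun k => pvCpl (T.drop k) H) _ 0 j (List.mem_range.2 hjT))
    · rw [List.drop_eq_nil_of_le (by omega), pvCpl_nil_left] at hcp; omega
  · intro hM
    rcases foldl_max_attained (fun k => pvCpl (T.drop k) H) (List.range T.length) 0 with h | ⟨k, hk, h⟩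
    · rw [pvMax] at hM; omega
    · refine ⟨k, (take_prefix_iff_le_cpl _ _ L hL).2 ?_⟩
      rw [pvMax, h] at hM; exact hM

lemma find_of_prefix (C sub : List Char) (h : sub <+: C) : PySem.Chars.find C sub = 0 := by
  have h0 : 0 ≤ PySem.Chars.find C sub := (PySem.Chars.find_nonneg_iff C sub).2 h.isInfix
  obtain ⟨hpre, hmin⟩ := PySem.Chars.find_spec h0
  rcases Nat.eq_zero_or_pos (PySem.Chars.find C sub).toNat with hz | hpos
  · omega
  · exact absurd (by simpa using h) (hmin 0 hpos)

lemma pvALoop_eq_aux (C T H : List Char) (hHC : H <+: C) (n : Nat)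
    (hM : pvMax T H ≤ 20 + n) (hmH : 20 + n ≤ H.length) :
    pvALoop C T H (PySem.List.pyRange ((20 + n : Nat) : Int) 20 (-1)) =
      if 20 < pvMax T H then (pvMax T H : Int) else 0 := by
  induction n with
  | zero =>
    rw [PySem.List.pyRange_neg_one_eq_nil (by omega), if_neg (by omega)]
    rfl
  | succ n ih =>
    rw [PySem.List.pyRange_neg_one_cons (by push_cast; omega)]
    have hstep : ((20 + (n + 1) : Nat) : Int) - 1 = ((20 + n : Nat) : Int) := by push_cast; ring
    rw [hstep]
    simp only [pvALoop]
    rw [PySem.List.slice_to H (Int.natCast_nonneg _)]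
    simp only [Int.toNat_natCast]
    by_cases hin : PySem.Chars.isIn (H.take (20 + (n + 1))) T = true
    · have h21 : 20 + (n + 1) ≤ pvMax T H :=
        (isIn_take_iff T H (20 + (n + 1)) (by omega) hmH).1 hin
      rw [find_of_prefix C _ ((H.take_prefix _).trans hHC)]
      simp only [hin, le_refl, if_pos]
      rw [if_pos (by omega)]
      omega
    · have h21 : ¬ (20 + (n + 1) ≤ pvMax T H) := fun h =>
        hin ((isIn_take_iff T H (20 + (n + 1)) (by omega) hmH).2 h)
      simp only [Bool.not_eq_true] at hin
      simp only [hin, Bool.false_eq_true, if_false]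
      exact ih (by omega) (by omega)

lemma bfold_eq (T H : List Char) (N : Nat) :
    (PySem.List.pyRange 0 ((N : Nat) : Int) 1).foldl
      (fun b i => if b < (pvCpl (PySem.List.slice T (some i) none) H : Int)
                  then (pvCpl (PySem.List.slice T (some i) none) H : Int) else b) 0
    = (((List.range N).foldl (fun acc k => max acc (pvCpl (T.drop k) H)) 0 : Nat) : Int) := by
  induction N with
  | zero => simp [PySem.List.pyRange_one_eq_nil]
  | succ N ih =>
    have hc : ((N + 1 : Nat) : Int) = (N : Int) + 1 := by push_cast; ring
    rw [hc, PySem.List.pyRange_one_succ_right (Int.natCast_nonneg _), List.range_succ,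
      List.foldl_append, List.foldl_append, ih]
    simp only [List.foldl_cons, List.foldl_nil]
    rw [PySem.List.slice_from T (Int.natCast_nonneg _)]
    simp only [Int.toNat_natCast]
    split_ifs with h
    · rw [Nat.max_eq_right (by exact_mod_cast h.le)]
    · rw [Nat.max_eq_left (by exact_mod_cast not_lt.1 h)]

-- the two ports agree on every input
theorem pv_ports_agree (prev curr : String) :
    deduplicate_overlap_py prev curr = deduplicate_overlap_py_alt prev curr := by
  simp only [deduplicate_overlap_py, deduplicate_overlap_py_alt]
  generalize prev.toList = P
  generalize curr.toList = C
  set W : Int := min (min 400 (P.length : Int)) (C.length : Int) with hW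
  have hW0 : (0:Int) ≤ W := le_min (le_min (by norm_num) (Int.natCast_nonneg _)) (Int.natCast_nonneg _)
  have hWP : W ≤ (P.length : Int) := le_trans (min_le_left _ _) (min_le_right _ _)
  have hWC : W ≤ (C.length : Int) := min_le_right _ _
  rcases eq_or_lt_of_le hW0 with hw | hw
  · rw [show W = 0 from hw.symm, neg_zero, sub_zero]
    rw [PySem.List.slice_from P (a := 0) (le_refl 0),
        PySem.List.slice_from P (a := (P.length : Int)) (Int.natCast_nonneg _),
        PySem.List.slice_to C (le_refl 0)]
    simp [pvALoop, PySem.List.pyRange_neg_one_eq_nil, PySem.List.pyRange_one_eq_nil,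
      List.drop_length]
  · have hN : ((W.toNat : Nat) : Int) = W := Int.toNat_of_nonneg hW0
    set N := W.toNat with hNdef
    have hNpos : 0 < N := by omega
    have hNP : N ≤ P.length := by omega
    have hNC : N ≤ C.length := by omega
    rw [← hN]
    rw [PySem.List.slice_from_neg_natCast P N hNpos]
    have hBstart : (0:Int) ≤ (P.length : Int) - (N:Int) := by omega
    rw [PySem.List.slice_from P hBstart]
    have htn : ((P.length : Int) - (N : Int)).toNat = P.length - N := by omega
    rw [htn]
    rw [PySem.List.slice_to C (Int.natCast_nonneg N)]
    simp only [Int.toNat_natCast]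
    have hTlen : (P.drop (P.length - N)).length = N := by rw [List.length_drop]; omega
    have hHlen : (C.take N).length = N := by rw [List.length_take]; omega
    rw [hTlen, hHlen, min_self]
    rw [bfold_eq (P.drop (P.length - N)) (C.take N) N]
    have hMdef : pvMax (P.drop (P.length - N)) (C.take N)
        = (List.range N).foldl (fun acc k => max acc (pvCpl ((P.drop (P.length - N)).drop k) (C.take N))) 0 := by
      rw [pvMax, hTlen]
    have hMle : pvMax (P.drop (P.length - N)) (C.take N) ≤ N := by
      have := pvMax_le (P.drop (P.length - N)) (C.take N)
      omega
    rw [← hMdef]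
    by_cases h20 : N ≤ 20
    · rw [PySem.List.pyRange_neg_one_eq_nil (by omega : (N:Int) ≤ 20)]
      simp only [pvALoop]
      rw [if_neg (by omega)]
    · obtain ⟨n, hn⟩ : ∃ n, N = 20 + n := ⟨N - 20, by omega⟩
      rw [hn] at hMle hHlen ⊢
      rw [pvALoop_eq_aux C (P.drop (P.length - (20 + n))) (C.take (20 + n))
        ((List.take_prefix _ _)) n (by omega) (by omega)]
      by_cases hM20 : 20 < pvMax (P.drop (P.length - (20 + n))) (C.take (20 + n))
      · rw [if_pos hM20, if_pos (by exact_mod_cast hM20)]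
      · rw [if_neg hM20, if_neg (by exact_mod_cast hM20)]

-- ===== VERDICT (by name: the statement is the Claim_ definition above) =====
theorem deduplicate_overlap_py_spec : Claim_equal_deduplicate_overlap_py :=
  fun prev curr _ => pv_ports_agree prev curr
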